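-- pv_equiv track=rewrite | github.com/marcusl0we/WorkflowDevelopment | Original Python/Day2.py | get_positional_data_from_instructions
-- ===== SOURCE A (Python) =====
-- import copy
--
-- def get_positional_data_from_instructions(instructions: list, part2: bool):
--     horizontal_pos = 0
--     depth_pos = 0
--     aim = 0
--     il = copy.deepcopy(instructions)
--     for line in il:
--         line = line.strip().split()
--         if line[0] == 'forward':
--             horizontal_pos += int(line[-1])
--             if part2:
--                 depth_pos += aim * int(line[-1])
--         elif line[0] == 'down':
--             if part2:
--                 aim += int(line[-1])
--             else:
--                 depth_pos += int(line[-1])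
--         elif line[0] == 'up':
--             if part2:
--                 aim -= int(line[-1])
--             else:
--                 depth_pos -= int(line[-1])
--     return horizontal_pos, depth_pos, aim
-- ===== SOURCE B (Python) =====
-- def get_positional_data_from_instructions(instructions: list, part2: bool):
--     # Parse once into (cmd, value) pairs; only recognized commands are kept,
--     # preserving A's IndexError/ValueError behaviour on bad lines.
--     moves = []
--     for line in instructions:
--         tokens = line.strip().split()
--         cmd = tokens[0]
--         if cmd in ('forward', 'down', 'up'):
--             moves.append((cmd, int(tokens[-1])))
--     horizontal = sum(v for c, v in moves if c == 'forward')
--     aim_total = sum(v for c, v in moves if c == 'down') - sum(v for c, v in moves if c == 'up')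
--     if not part2:
--         return horizontal, aim_total, 0
--     depth = 0
--     aim = 0
--     for c, v in moves:
--         if c == 'down':
--             aim += v
--         elif c == 'up':
--             aim -= v
--         else:
--             depth += aim * v
--     return horizontal, depth, aim_total
-- ===== Notes on version B (the rewrite author's own statement) =====
-- stated objective: alternative
-- what changed: B first parses all lines into a (cmd,value) move list, computes horizontal and the final aim as filtered sums, and only for part2 makes one order-preserving pass over the parsed moves to accumulate depth, instead of A's single loop re-splitting and re-parsing each line while threading all three counters.
import Mathlib
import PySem

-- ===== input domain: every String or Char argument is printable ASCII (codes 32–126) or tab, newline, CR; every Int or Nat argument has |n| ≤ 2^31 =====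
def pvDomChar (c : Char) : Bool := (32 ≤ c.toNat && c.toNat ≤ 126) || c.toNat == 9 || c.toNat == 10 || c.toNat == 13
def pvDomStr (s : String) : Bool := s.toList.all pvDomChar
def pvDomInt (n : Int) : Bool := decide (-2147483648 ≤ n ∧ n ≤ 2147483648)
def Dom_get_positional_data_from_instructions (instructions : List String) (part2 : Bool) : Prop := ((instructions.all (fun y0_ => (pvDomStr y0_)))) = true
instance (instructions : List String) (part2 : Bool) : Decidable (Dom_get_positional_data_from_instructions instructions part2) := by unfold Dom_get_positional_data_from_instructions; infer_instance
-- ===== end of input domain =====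

-- B re-decomposes A's single three-counter loop into a parse pass plus sum/scan passes over the
-- parsed moves (alternative decomposition, same cost); equivalence is about the return value only.

-- ===== PORT A =====
-- one iteration of A's loop over the state (horizontal_pos, depth_pos, aim)
def pvStepA (part2 : Bool) (st : Int × Int × Int) (line : String) : Int × Int × Int :=
  let toks := PySem.Str.split₀ (PySem.Str.strip line)
  let head := PySem.List.pyGetD toks 0 ""
  let v := (PySem.Int.ofStr? (PySem.List.pyGetD toks (-1) "")).getD 0
  if head = "forward" then
    if part2 then (st.1 + v, st.2.1 + st.2.2 * v, st.2.2) else (st.1 + v, st.2.1, st.2.2)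
  else if head = "down" then
    if part2 then (st.1, st.2.1, st.2.2 + v) else (st.1, st.2.1 + v, st.2.2)
  else if head = "up" then
    if part2 then (st.1, st.2.1, st.2.2 - v) else (st.1, st.2.1 - v, st.2.2)
  else st

def get_positional_data_from_instructions (instructions : List String) (part2 : Bool) : Int × Int × Int :=
  instructions.foldl (pvStepA part2) (0, 0, 0)

-- ===== PORT B =====
-- B's parse of one line: [] for unrecognized commands, [(cmd, int(tokens[-1]))] otherwise
def pvParse (line : String) : List (String × Int) :=
  let tokens := PySem.Str.split₀ (PySem.Str.strip line)
  let cmd := PySem.List.pyGetD tokens 0 ""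
  if cmd = "forward" ∨ cmd = "down" ∨ cmd = "up" then
    [(cmd, (PySem.Int.ofStr? (PySem.List.pyGetD tokens (-1) "")).getD 0)]
  else []

-- B's part2 scan over the parsed moves, state (depth, aim)
def pvScan (st : Int × Int) (m : String × Int) : Int × Int :=
  if m.1 = "down" then (st.1, st.2 + m.2)
  else if m.1 = "up" then (st.1, st.2 - m.2)
  else (st.1 + st.2 * m.2, st.2)

def get_positional_data_from_instructions_alt (instructions : List String) (part2 : Bool) : Int × Int × Int :=
  let moves := instructions.flatMap pvParse
  let horizontal := ((moves.filter (fun m => m.1 = "forward")).map (·.2)).sum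
  let aimTotal := ((moves.filter (fun m => m.1 = "down")).map (·.2)).sum
                  - ((moves.filter (fun m => m.1 = "up")).map (·.2)).sum
  if !part2 then (horizontal, aimTotal, 0)
  else
    let dp := moves.foldl pvScan (0, 0)
    (horizontal, dp.1, aimTotal)

-- ===== PRECONDITION & SPEC =====
-- Pre_ excludes exactly the inputs where the Python raises: a line with no tokens (IndexError on
-- line[0]) or a recognized command whose last token is not an int literal (ValueError).
def Pre_get_positional_data_from_instructions (instructions : List String) (part2 : Bool) : Prop :=
  ∀ line ∈ instructions,
    PySem.Str.split₀ (PySem.Str.strip line) ≠ [] ∧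
    (PySem.List.pyGetD (PySem.Str.split₀ (PySem.Str.strip line)) 0 ""
        ∈ (["forward", "down", "up"] : List String) →
      (PySem.Int.ofStr? (PySem.List.pyGetD (PySem.Str.split₀ (PySem.Str.strip line)) (-1) "")).isSome)
instance (instructions : List String) (part2 : Bool) : Decidable (Pre_get_positional_data_from_instructions instructions part2) := by unfold Pre_get_positional_data_from_instructions; infer_instance

def pvWitness_get_positional_data_from_instructions : List String × Bool :=
  (["forward 5", " down 3", "up 1", "hover please", "forward 2"], true)

def Spec_get_positional_data_from_instructions (instructions : List String) (part2 : Bool) (out : Int × Int × Int) : Prop := out = get_positional_data_from_instructions_alt instructions part2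
instance (instructions : List String) (part2 : Bool) (out : Int × Int × Int) : Decidable (Spec_get_positional_data_from_instructions instructions part2 out) := by unfold Spec_get_positional_data_from_instructions; infer_instance

-- ===== CLAIM (what is proved, stated in full; the proofs are below) =====
def Claim_equal_get_positional_data_from_instructions : Prop := ∀ (instructions : List String) (part2 : Bool), Dom_get_positional_data_from_instructions instructions part2 → Pre_get_positional_data_from_instructions instructions part2 → Spec_get_positional_data_from_instructions instructions part2 (get_positional_data_from_instructions instructions part2)

-- ===== LEMMAS AND PROOFS =====

-- shorthand for the three filtered sums over a move list
def pvH (ms : List (String × Int)) : Int := ((ms.filter (fun m => m.1 = "forward")).map (·.2)).sum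
def pvDn (ms : List (String × Int)) : Int := ((ms.filter (fun m => m.1 = "down")).map (·.2)).sum
def pvUp (ms : List (String × Int)) : Int := ((ms.filter (fun m => m.1 = "up")).map (·.2)).sum

lemma pvScan_foldl_aim (ms : List (String × Int)) (d a : Int) :
    (ms.foldl pvScan (d, a)).2 = a + pvDn ms - pvUp ms := by
  induction ms generalizing d a with
  | nil => simp [pvDn, pvUp]
  | cons m ms ih =>
    simp only [List.foldl_cons, pvScan, pvDn, pvUp, List.filter_cons]
    split_ifs with h1 h2 <;>
      simp_all [pvScan, pvDn, pvUp, ih] <;> ring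

-- part1: A's loop is the filtered sums, aim untouched
lemma pvA_false (ls : List String) (h d a : Int) :
    ls.foldl (pvStepA false) (h, d, a) =
      (h + pvH (ls.flatMap pvParse), d + pvDn (ls.flatMap pvParse) - pvUp (ls.flatMap pvParse), a) := by
  induction ls generalizing h d a with
  | nil => simp [pvH, pvDn, pvUp]
  | cons l ls ih =>
    simp only [List.foldl_cons, List.flatMap_cons]
    rw [pvStepA, pvParse]
    split_ifs with h1 h2 h3 <;>
      simp_all [pvH, pvDn, pvUp, List.filter_append, List.filter_cons] <;> ring_nf <;> omega

-- part2: A's loop is horizontal sum + B's (depth, aim) scan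
lemma pvA_true (ls : List String) (h d a : Int) :
    ls.foldl (pvStepA true) (h, d, a) =
      (h + pvH (ls.flatMap pvParse),
       (((ls.flatMap pvParse).foldl pvScan (d, a)).1,
        ((ls.flatMap pvParse).foldl pvScan (d, a)).2)) := by
  induction ls generalizing h d a with
  | nil => simp [pvH]
  | cons l ls ih =>
    simp only [List.foldl_cons, List.flatMap_cons, List.foldl_append]
    rw [pvStepA, pvParse]
    split_ifs with h1 h2 h3 <;>
      simp_all [pvH, List.filter_append, List.filter_cons, pvScan] <;> ring

-- ===== VERDICT (by name: the statement is the Claim_ definition above) =====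
theorem get_positional_data_from_instructions_spec : Claim_equal_get_positional_data_from_instructions := by
  intro instructions part2 _ _
  unfold Spec_get_positional_data_from_instructions
  unfold get_positional_data_from_instructions get_positional_data_from_instructions_alt
  cases part2 with
  | false =>
    rw [pvA_false]
    simp [pvH, pvDn, pvUp]
  | true =>
    rw [pvA_true]
    have := pvScan_foldl_aim (instructions.flatMap pvParse) 0 0
    simp_all [pvH, pvDn, pvUp]
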